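-- pv_equiv track=rewrite | github.com/asthtls/coding_test | programmers/Lv0/최빈값 구하기.py | solution
-- ===== SOURCE A (Python) =====
-- def solution(array):
--     arr = [0] * (max(array) +1)
--
--     for i in array:
--         arr[i] += 1
--
--     most = -1
--     max_idx = 0
--     s_max_idx = 0
--     for idx, n in enumerate(arr):
--         if n > max_idx:
--             most = idx
--             max_idx = n
--         elif n == max_idx:
--             s_max_idx = n
--
--     return most if max_idx != s_max_idx else -1
-- ===== SOURCE B (Python) =====
-- def _pick_mode(counts):
--     m = max(counts)
--     return counts.index(m) if counts.count(m) == 1 else -1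
--
-- def solution(array):
--     counts = [0] * (max(array) + 1)
--     for i in array:
--         counts[i] += 1
--     return _pick_mode(counts)
-- ===== Notes on version B (the rewrite author's own statement) =====
-- stated objective: idiomatic
-- what changed: A's single-pass loop that tracks (most, max_idx, s_max_idx) with stale tie state is replaced by the standard max/count/index decomposition over the same counting table: take the maximum count, return its first index if it occurs exactly once, else -1.
import Mathlib
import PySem

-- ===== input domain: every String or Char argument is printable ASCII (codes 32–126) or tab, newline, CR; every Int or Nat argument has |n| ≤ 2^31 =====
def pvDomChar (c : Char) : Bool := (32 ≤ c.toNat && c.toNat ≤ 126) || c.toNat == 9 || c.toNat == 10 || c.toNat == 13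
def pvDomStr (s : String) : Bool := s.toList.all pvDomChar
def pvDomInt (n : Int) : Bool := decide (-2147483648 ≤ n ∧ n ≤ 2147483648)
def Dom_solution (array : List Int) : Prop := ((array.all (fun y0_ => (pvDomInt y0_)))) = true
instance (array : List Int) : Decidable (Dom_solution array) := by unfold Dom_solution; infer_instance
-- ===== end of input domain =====

-- B replaces A's single-pass (most, max_idx, s_max_idx) tie-tracking loop over the counting
-- table by the idiomatic max / count / index decomposition over the same table.

-- ===== PORT A =====
-- one step of A's second loop: 'if n > max_idx: … elif n == max_idx: …' on state (most, max_idx, s_max_idx)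
def stepA (s : Int × Int × Int) (p : Int × Int) : Int × Int × Int :=
  if p.2 > s.2.1 then (p.1, p.2, s.2.2)
  else if p.2 == s.2.1 then (s.1, s.2.1, p.2)
  else s

def solution (array : List Int) : Int :=
  match PySem.List.max? array (fun x => x) with
  | none => 0  -- max([]) raises ValueError; excluded by Pre_solution
  | some mx =>
    -- arr = [0] * (max(array)+1); for i in array: arr[i] += 1
    let arr := array.foldl
      (fun a i => PySem.List.pySetD a i (PySem.List.pyGetD a i 0 + 1))
      (PySem.List.pyRepeat [0] (mx + 1))
    -- 'for idx, n in enumerate(arr)': the same loop with idx as a running counter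
    -- (materializing PySem.List.enumerate overflows the evaluator's stack on large tables;
    --  foldIdx_eq_enumerate below proves this fold IS the fold over PySem.List.enumerate)
    let st := (arr.foldl
      (fun (p : (Int × Int × Int) × Int) n => (stepA p.1 (p.2, n), p.2 + 1))
      ((-1, 0, 0), 0)).1
    if st.2.1 != st.2.2 then st.1 else -1

-- ===== PORT B =====
-- B's helper _pick_mode: m = max(counts); counts.index(m) if counts.count(m) == 1 else -1
def pickMode (counts : List Int) : Int :=
  match PySem.List.max? counts (fun x => x) with
  | none => 0  -- max([]) raises ValueError; unreachable under Pre_solution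
  | some m =>
    if PySem.List.count counts m == 1
    then ((PySem.List.index? counts m).getD 0 : Int)
    else -1

def solution_alt (array : List Int) : Int :=
  match PySem.List.max? array (fun x => x) with
  | none => 0  -- max([]) raises ValueError; excluded by Pre_solution
  | some mx =>
    -- counts = [0] * (max(array)+1); for i in array: counts[i] += 1
    let counts := array.foldl
      (fun a i => PySem.List.pySetD a i (PySem.List.pyGetD a i 0 + 1))
      (PySem.List.pyRepeat [0] (mx + 1))
    pickMode counts

-- ===== PRECONDITION & SPEC =====
-- Pre_ excludes exactly the inputs on which A raises: the empty list (ValueError from max),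
-- and lists whose elements would index outside the counting table of length max+1
-- (IndexError): a negative max, or an element below -(max+1).
def Pre_solution (array : List Int) : Prop :=
  array ≠ [] ∧ 0 ≤ array.tail.foldl max array.headI ∧
    ∀ i ∈ array, -(array.tail.foldl max array.headI + 1) ≤ i

instance (array : List Int) : Decidable (Pre_solution array) := by
  unfold Pre_solution; infer_instance

def pvWitness_solution : List Int := [1, 2, 2]

def Spec_solution (array : List Int) (out : Int) : Prop := out = solution_alt array
instance (array : List Int) (out : Int) : Decidable (Spec_solution array out) := by unfold Spec_solution; infer_instance

-- ===== CLAIM (what is proved, stated in full; the proofs are below) =====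
def Claim_equal_solution : Prop := ∀ (array : List Int), Dom_solution array → Pre_solution array → Spec_solution array (solution array)

-- ===== LEMMAS AND PROOFS =====

-- sum of a list after setting one entry
lemma sum_set_int (l : List Int) (n : Nat) (h : n < l.length) (v : Int) :
    (l.set n v).sum = l.sum - l[n] + v := by
  induction l generalizing n with
  | nil => simp at h
  | cons a t ih =>
    cases n with
    | zero => simp; ring
    | succ n =>
      simp only [List.set_cons_succ, List.sum_cons, List.getElem_cons_succ]
      rw [ih n (by simpa using h)]; ring

lemma sum_nonpos_int (l : List Int) (h : ∀ c ∈ l, c ≤ 0) : l.sum ≤ 0 := by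
  induction l with
  | nil => simp
  | cons a t ih =>
    simp only [List.sum_cons]
    have := h a (by simp)
    have := ih (fun c hc => h c (by simp [hc]))
    omega

-- one counting step 'arr[i] += 1' under an in-range index
lemma step_eq (acc : List Int) (i : Int)
    (h1 : -(acc.length : Int) ≤ i) (h2 : i < (acc.length : Int)) :
    ∃ k : Nat, ∃ hk : k < acc.length,
      PySem.List.pySetD acc i (PySem.List.pyGetD acc i 0 + 1) = acc.set k (acc[k] + 1) := by
  by_cases h0 : 0 ≤ i
  · have hidx : PySem.List.pyIdx? acc.length i = some i.toNat := by
      unfold PySem.List.pyIdx?; rw [if_pos h0, if_pos h2]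
    have hk : i.toNat < acc.length := by omega
    exact ⟨i.toNat, hk, by
      simp [PySem.List.pySetD, PySem.List.pySet?, PySem.List.pyGetD, PySem.List.pyGet?,
        hidx, List.getElem?_eq_getElem hk]⟩
  · have hidx : PySem.List.pyIdx? acc.length i = some (acc.length - (-i).toNat) := by
      unfold PySem.List.pyIdx?; rw [if_neg h0, if_pos h1]
    have hk : acc.length - (-i).toNat < acc.length := by omega
    exact ⟨acc.length - (-i).toNat, hk, by
      simp [PySem.List.pySetD, PySem.List.pySet?, PySem.List.pyGetD, PySem.List.pyGet?,
        hidx, List.getElem?_eq_getElem hk]⟩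

-- invariant of the counting loop: length and nonnegativity are preserved, the sum counts steps
lemma counts_props (M : Int) (ar : List Int)
    (hin : ∀ i ∈ ar, -(M + 1) ≤ i ∧ i ≤ M) :
    ∀ acc : List Int, (acc.length : Int) = M + 1 → (∀ c ∈ acc, 0 ≤ c) →
    ((ar.foldl (fun a i => PySem.List.pySetD a i (PySem.List.pyGetD a i 0 + 1)) acc).length : Int) = M + 1 ∧
    (∀ c ∈ ar.foldl (fun a i => PySem.List.pySetD a i (PySem.List.pyGetD a i 0 + 1)) acc, 0 ≤ c) ∧
    (ar.foldl (fun a i => PySem.List.pySetD a i (PySem.List.pyGetD a i 0 + 1)) acc).sum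
      = acc.sum + ar.length := by
  induction ar with
  | nil => intro acc hlen hpos; simpa using ⟨hlen, hpos⟩
  | cons j rest ih =>
    intro acc hlen hpos
    have hj := hin j (by simp)
    obtain ⟨k, hk, hset⟩ := step_eq acc j (by omega) (by omega)
    have hknn : 0 ≤ acc[k] := hpos _ (List.getElem_mem hk)
    simp only [List.foldl_cons, hset]
    have h1 : ((acc.set k (acc[k] + 1)).length : Int) = M + 1 := by simpa using hlen
    have h2 : ∀ c ∈ acc.set k (acc[k] + 1), 0 ≤ c := by
      intro c hc
      rcases List.mem_or_eq_of_mem_set hc with h | h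
      · exact hpos _ h
      · omega
    obtain ⟨ha, hb, hc⟩ := ih (fun i hi => hin i (by simp [hi])) (acc.set k (acc[k] + 1)) h1 h2
    refine ⟨ha, hb, ?_⟩
    rw [hc, sum_set_int acc k hk]
    simp; ring

-- branch lemmas for one step of A's second loop
lemma stepA_gt (s : Int × Int × Int) (p : Int × Int) (h : s.2.1 < p.2) :
    stepA s p = (p.1, p.2, s.2.2) := by
  unfold stepA; rw [if_pos h]

lemma stepA_eql (s : Int × Int × Int) (p : Int × Int) (h : p.2 = s.2.1) :
    stepA s p = (s.1, s.2.1, p.2) := by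
  unfold stepA; rw [if_neg (by omega), if_pos (by simp [h])]

lemma stepA_lt (s : Int × Int × Int) (p : Int × Int) (h : p.2 < s.2.1) :
    stepA s p = s := by
  unfold stepA; rw [if_neg (by omega), if_neg (by simp; omega)]

-- characterization of A's second loop over an arbitrary counts list
lemma foldA_char (xs : List Int) :
    ((PySem.List.enumerate xs 0).foldl stepA (-1, 0, 0)).2.1 = xs.foldl max 0 ∧
    ((PySem.List.enumerate xs 0).foldl stepA (-1, 0, 0)).2.2 ≤ xs.foldl max 0 ∧
    (((PySem.List.enumerate xs 0).foldl stepA (-1, 0, 0)).1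
      = if 0 < xs.foldl max 0
        then (((PySem.List.index? xs (xs.foldl max 0)).getD 0 : Nat) : Int) else -1) ∧
    (((PySem.List.enumerate xs 0).foldl stepA (-1, 0, 0)).2.2 = xs.foldl max 0
      ↔ (xs.foldl max 0 = 0 ∨ 2 ≤ PySem.List.count xs (xs.foldl max 0))) := by
  induction xs using List.reverseRecOn with
  | nil => simp [PySem.List.enumerate, PySem.List.count]
  | append_singleton xs x ih =>
    obtain ⟨ih1, ih2, ih3, ih4⟩ := ih
    set st := (PySem.List.enumerate xs 0).foldl stepA (-1, 0, 0) with hst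
    have hM0 : (0:Int) ≤ xs.foldl max 0 := (PySem.List.le_foldl_max xs 0).1
    have hub : ∀ y ∈ xs, y ≤ xs.foldl max 0 := (PySem.List.le_foldl_max xs 0).2
    have henum : PySem.List.enumerate (xs ++ [x]) 0
        = PySem.List.enumerate xs 0 ++ [((xs.length : Int), x)] := by
      rw [PySem.List.enumerate_append]
      simp [PySem.List.enumerate_cons, PySem.List.enumerate_nil]
    have hmax : (xs ++ [x]).foldl max 0 = max (xs.foldl max 0) x := by
      rw [List.foldl_append]; simp
    rw [henum, List.foldl_append, hmax]
    simp only [List.foldl_cons, List.foldl_nil, ← hst]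
    have hmemM : 0 < xs.foldl max 0 → xs.foldl max 0 ∈ xs := by
      intro h
      rcases PySem.List.foldl_max_mem xs (0:Int) with hh | hh
      · omega
      · exact hh
    rcases lt_trichotomy (xs.foldl max 0) x with hgt | heq | hlt
    · -- x > M : state becomes (len xs, x, s)
      have hx0 : (0:Int) < x := by omega
      have hnotmem : x ∉ xs := fun hmem => absurd (hub x hmem) (by omega)
      rw [stepA_gt st _ (by show st.2.1 < x; omega)]
      rw [max_eq_right (le_of_lt hgt)]
      have hidx : PySem.List.index? (xs ++ [x]) x = some xs.length :=
        PySem.List.index?_append_singleton_self xs x hnotmem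
      have hcnt1 : PySem.List.count (xs ++ [x]) x = 1 := by
        simp [PySem.List.count_eq, List.count_append,
          List.count_eq_zero_of_not_mem hnotmem]
      refine ⟨rfl, show st.2.2 ≤ x by omega, ?_, ?_⟩
      · show ((xs.length : Nat) : Int) = _
        rw [if_pos hx0, hidx]
        rfl
      · show st.2.2 = x ↔ _
        constructor
        · intro h; exfalso; omega
        · intro h
          rcases h with h | h
          · omega
          · rw [hcnt1] at h; omega
    · -- x == M : state becomes (most, M, x)
      rw [stepA_eql st _ (by show x = st.2.1; omega)]
      rw [max_eq_left (le_of_eq heq.symm)]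
      refine ⟨ih1, show x ≤ xs.foldl max 0 by omega, ?_, ?_⟩
      · show st.1 = _
        rw [ih3]
        by_cases hx0 : (0:Int) < xs.foldl max 0
        · rw [if_pos hx0, if_pos hx0,
            PySem.List.index?_append_of_mem [x] (hmemM hx0)]
        · rw [if_neg hx0, if_neg hx0]
      · show x = xs.foldl max 0 ↔ _
        constructor
        · intro _
          by_cases hx0 : xs.foldl max 0 = 0
          · exact Or.inl hx0
          · right
            have hmem := hmemM (by omega)
            have h1 : 1 ≤ List.count (xs.foldl max 0) xs := List.count_pos_iff.mpr hmem
            have h2 : List.count (xs.foldl max 0) [x] = 1 := by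
              rw [heq]; simp
            simp [PySem.List.count_eq, List.count_append, h2]
            omega
        · intro _; omega
    · -- x < M : state unchanged
      rw [stepA_lt st _ (by show x < st.2.1; omega)]
      rw [max_eq_left (le_of_lt hlt)]
      have h0 : List.count (xs.foldl max 0) [x] = 0 :=
        List.count_eq_zero.mpr (by simp; omega)
      have hcnt : PySem.List.count (xs ++ [x]) (xs.foldl max 0)
          = PySem.List.count xs (xs.foldl max 0) := by
        simp [PySem.List.count_eq, List.count_append, h0]
      refine ⟨ih1, ih2, ?_, ?_⟩
      · rw [ih3]
        by_cases hx0 : (0:Int) < xs.foldl max 0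
        · rw [if_pos hx0, if_pos hx0,
            PySem.List.index?_append_of_mem [x] (hmemM hx0)]
        · rw [if_neg hx0, if_neg hx0]
      · rw [hcnt]; exact ih4

-- the second phases of A and B agree on any nonnegative counts list of positive sum
lemma phase_eq (c : Int) (cs : List Int)
    (hpos : ∀ y ∈ c :: cs, 0 ≤ y) (hsum : 1 ≤ (c :: cs).sum) :
    (if ((PySem.List.enumerate (c :: cs) 0).foldl stepA (-1, 0, 0)).2.1
        != ((PySem.List.enumerate (c :: cs) 0).foldl stepA (-1, 0, 0)).2.2
     then ((PySem.List.enumerate (c :: cs) 0).foldl stepA (-1, 0, 0)).1 else -1)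
    = (if PySem.List.count (c :: cs) (cs.foldl max c) == 1
       then ((PySem.List.index? (c :: cs) (cs.foldl max c)).getD 0 : Int)
       else -1) := by
  have hmmem : cs.foldl max c ∈ c :: cs := by
    rcases PySem.List.foldl_max_mem cs c with h | h
    · simp [h]
    · simp [h]
  have hmub : ∀ y ∈ c :: cs, y ≤ cs.foldl max c := by
    intro y hy
    have := PySem.List.le_foldl_max cs c
    rcases List.mem_cons.mp hy with h | h
    · subst h; exact this.1
    · exact this.2 y h
  have hm1 : 1 ≤ cs.foldl max c := by
    by_contra h
    have hall : ∀ y ∈ c :: cs, y ≤ 0 := fun y hy => by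
      have := hmub y hy; omega
    have := sum_nonpos_int _ hall
    omega
  have hF : (c :: cs).foldl max 0 = cs.foldl max c := by
    have h1 : cs.foldl max c ≤ (c :: cs).foldl max 0 :=
      (PySem.List.le_foldl_max (c :: cs) 0).2 _ hmmem
    rcases PySem.List.foldl_max_mem (c :: cs) (0:Int) with h | h
    · omega
    · have := hmub _ h; omega
  obtain ⟨c1, c2, c3, c4⟩ := foldA_char (c :: cs)
  rw [hF] at c1 c2 c3 c4
  have hcount1 : 1 ≤ PySem.List.count (c :: cs) (cs.foldl max c) := by
    simpa [PySem.List.count_eq] using List.count_pos_iff.mpr hmmem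
  by_cases htwo : 2 ≤ PySem.List.count (c :: cs) (cs.foldl max c)
  · -- tie: both return -1
    have hs := c4.mpr (Or.inr htwo)
    have hne1 : PySem.List.count (c :: cs) (cs.foldl max c) ≠ 1 := by omega
    rw [if_neg (by rw [c1, hs, bne_self_eq_false]; exact Bool.false_ne_true)]
    rw [if_neg (fun h => hne1 (beq_iff_eq.mp h))]
  · -- unique maximum: both return its first index
    have hcnt : PySem.List.count (c :: cs) (cs.foldl max c) = 1 := by omega
    have hs : ((PySem.List.enumerate (c :: cs) 0).foldl stepA (-1, 0, 0)).2.2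
        ≠ cs.foldl max c := by
      intro h
      rcases c4.mp h with h0 | h2
      · omega
      · exact htwo h2
    rw [if_pos (bne_iff_ne.mpr (by rw [c1]; exact fun h => hs h.symm))]
    rw [if_pos (by rw [hcnt]; rfl)]
    rw [c3, if_pos (by omega)]

-- the index-carrying fold is the fold over enumerate
lemma foldIdx_eq_enumerate (xs : List Int) : ∀ (s : Int × Int × Int) (k : Int),
    (xs.foldl (fun (p : (Int × Int × Int) × Int) n => (stepA p.1 (p.2, n), p.2 + 1)) (s, k)).1
      = (PySem.List.enumerate xs k).foldl stepA s := by
  induction xs with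
  | nil => intro s k; simp [PySem.List.enumerate_nil]
  | cons a t ih =>
    intro s k
    simp only [List.foldl_cons, PySem.List.enumerate_cons, ih]

-- reduction of B's helper on a nonempty list
lemma pickMode_cons (c : Int) (cs : List Int) :
    pickMode (c :: cs)
      = (if PySem.List.count (c :: cs) (cs.foldl max c) == 1
         then ((PySem.List.index? (c :: cs) (cs.foldl max c)).getD 0 : Int)
         else -1) := by
  unfold pickMode
  rw [PySem.List.max?_id_cons]

-- ===== VERDICT (by name: the statement is the Claim_ definition above) =====
theorem solution_spec : Claim_equal_solution := by
  intro array _ hpre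
  unfold Spec_solution
  obtain ⟨hne, hM0, hbound⟩ := hpre
  match array, hne with
  | x :: t, _ =>
    simp only [List.tail_cons, List.headI_cons] at hM0 hbound
    have hub : ∀ i ∈ x :: t, i ≤ t.foldl max x := by
      intro i hi
      have := PySem.List.le_foldl_max t x
      rcases List.mem_cons.mp hi with h | h
      · subst h; exact this.1
      · exact this.2 i h
    have hin : ∀ i ∈ x :: t, -(t.foldl max x + 1) ≤ i ∧ i ≤ t.foldl max x :=
      fun i hi => ⟨hbound i hi, hub i hi⟩
    unfold solution solution_alt
    rw [PySem.List.max?_id_cons]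
    simp only
    have hacc0len : (((PySem.List.pyRepeat ([0] : List Int) (t.foldl max x + 1))).length : Int)
        = t.foldl max x + 1 := by
      rw [PySem.List.pyRepeat_singleton]; simp; omega
    have hacc0pos : ∀ c ∈ PySem.List.pyRepeat ([0] : List Int) (t.foldl max x + 1), (0:Int) ≤ c := by
      rw [PySem.List.pyRepeat_singleton]; intro c hc
      simp at hc; omega
    obtain ⟨hlen, hpos, hsum⟩ := counts_props (t.foldl max x) (x :: t) hin _ hacc0len hacc0pos
    have hsum0 : (PySem.List.pyRepeat ([0] : List Int) (t.foldl max x + 1)).sum = 0 := by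
      rw [PySem.List.pyRepeat_singleton]; simp
    rw [hsum0] at hsum
    obtain ⟨c, cs, hcc⟩ : ∃ c cs,
        (x :: t).foldl (fun a i => PySem.List.pySetD a i (PySem.List.pyGetD a i 0 + 1))
          (PySem.List.pyRepeat ([0] : List Int) (t.foldl max x + 1)) = c :: cs := by
      rcases h : (x :: t).foldl (fun a i => PySem.List.pySetD a i (PySem.List.pyGetD a i 0 + 1))
          (PySem.List.pyRepeat ([0] : List Int) (t.foldl max x + 1)) with _ | ⟨c, cs⟩
      · rw [h] at hlen; simp at hlen; omega
      · exact ⟨c, cs, rfl⟩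
    rw [hcc] at hpos hsum
    rw [hcc, pickMode_cons, foldIdx_eq_enumerate]
    exact phase_eq c cs hpos (by rw [hsum]; simp)
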